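-- pv_equiv track=rewrite | github.com/CatalinGiga/Planes---Battleships-Modified-Version | main.py | createGameGrid
-- ===== SOURCE A (Python) =====
-- def createGameGrid(rows, cols, cell_size, pos):
--     """Creates a game grid with coordinates for each cell"""
--     startX = pos[0]
--     startY = pos[1]
--     coordGrid = []
--     for row in range(rows):
--         rowX = []
--         for col in range(cols):
--             rowX.append((startX, startY))
--             startX += cell_size
--         coordGrid.append(rowX)
--         startX = pos[0]
--         startY += cell_size
--     return coordGrid
-- ===== SOURCE B (Python) =====
-- def createGameGrid(rows, cols, cell_size, pos):
--     """Creates a game grid with coordinates for each cell"""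
--     if rows <= 0:
--         return []
--     # compute only the first row in closed form, then derive each
--     # subsequent row by translating the previous one by cell_size in y
--     first = [(pos[0] + c * cell_size, pos[1]) for c in range(cols)]
--     grid = [first]
--     for _ in range(rows - 1):
--         grid.append([(x, y + cell_size) for (x, y) in grid[-1]])
--     return grid
-- ===== Notes on version B (the rewrite author's own statement) =====
-- stated objective: alternative
-- what changed: Instead of re-accumulating every cell in a nested loop, B computes only the first row in closed form (pos[0]+c*cell_size) and derives each subsequent row by translating the previous row by cell_size in y.
import Mathlib
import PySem

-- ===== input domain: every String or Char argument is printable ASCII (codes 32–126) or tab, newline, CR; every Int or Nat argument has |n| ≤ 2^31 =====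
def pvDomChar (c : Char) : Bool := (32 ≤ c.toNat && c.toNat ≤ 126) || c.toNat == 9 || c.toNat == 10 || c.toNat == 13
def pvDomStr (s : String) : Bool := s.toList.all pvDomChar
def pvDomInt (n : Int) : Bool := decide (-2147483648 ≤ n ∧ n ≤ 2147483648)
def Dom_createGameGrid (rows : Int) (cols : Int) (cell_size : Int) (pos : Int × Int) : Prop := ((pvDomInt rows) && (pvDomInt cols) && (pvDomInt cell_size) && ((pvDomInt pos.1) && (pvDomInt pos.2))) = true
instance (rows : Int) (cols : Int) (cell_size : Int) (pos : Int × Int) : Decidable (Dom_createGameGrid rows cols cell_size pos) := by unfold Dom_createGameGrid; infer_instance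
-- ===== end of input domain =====

-- ===== PORT A =====
-- B computes only the first row in closed form and derives each later row by translating
-- the previous one by cell_size in y (objective: alternative).
-- Each Python list.append loop is transcribed as a cons-accumulating fold followed by reverse.
def createGameGrid (rows : Int) (cols : Int) (cell_size : Int) (pos : Int × Int) : List (List (Int × Int)) :=
  let startX := pos.1
  let startY := pos.2
  let st :=
    (PySem.List.pyRange 0 rows 1).foldl
      (fun (st : List (List (Int × Int)) × Int × Int) _ =>
        let inner :=
          (PySem.List.pyRange 0 cols 1).foldl
            (fun (st2 : List (Int × Int) × Int) _ =>
              ((st2.2, st.2.2) :: st2.1, st2.2 + cell_size))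
            ([], st.2.1)
        (inner.1.reverse :: st.1, pos.1, st.2.2 + cell_size))
      ([], startX, startY)
  st.1.reverse

-- ===== PORT B =====
-- grid[-1] in Source B is the head of the cons-accumulated (reversed) list of rows.
def createGameGrid_alt (rows : Int) (cols : Int) (cell_size : Int) (pos : Int × Int) : List (List (Int × Int)) :=
  if rows ≤ 0 then []
  else
    let first := (PySem.List.pyRange 0 cols 1).map (fun c => (pos.1 + c * cell_size, pos.2))
    ((PySem.List.pyRange 0 (rows - 1) 1).foldl
        (fun (g : List (List (Int × Int))) _ =>
          (g.headD []).map (fun p => (p.1, p.2 + cell_size)) :: g)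
        [first]).reverse

-- ===== PRECONDITION & SPEC =====
def Spec_createGameGrid (rows : Int) (cols : Int) (cell_size : Int) (pos : Int × Int) (out : List (List (Int × Int))) : Prop := out = createGameGrid_alt rows cols cell_size pos
instance (rows : Int) (cols : Int) (cell_size : Int) (pos : Int × Int) (out : List (List (Int × Int))) : Decidable (Spec_createGameGrid rows cols cell_size pos out) := by unfold Spec_createGameGrid; infer_instance

-- ===== CLAIM (what is proved, stated in full; the proofs are below) =====
def Claim_equal_createGameGrid : Prop := ∀ (rows : Int) (cols : Int) (cell_size : Int) (pos : Int × Int), Dom_createGameGrid rows cols cell_size pos → Spec_createGameGrid rows cols cell_size pos (createGameGrid rows cols cell_size pos)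

-- ===== LEMMAS AND PROOFS =====

-- Peeling the first element off a mapped List.range.
theorem map_range_succ {α : Type} (n : Nat) (f : Nat → α) (b : α) (g : Nat → α)
    (hb : b = f 0) (hg : ∀ i, g i = f (i + 1)) :
    b :: (List.range n).map g = (List.range (n + 1)).map f := by
  subst hb
  rw [List.range_succ_eq_map, List.map_cons, List.map_map]
  congr 1
  exact List.map_congr_left (fun i _ => by simp [hg i, Nat.succ_eq_add_one])

-- A's inner-row fold in closed form.
theorem row_fold {α : Type} (l : List α) (acc : List (Int × Int)) (x y cs : Int) :
    ((l.foldl (fun (st2 : List (Int × Int) × Int) _ => ((st2.2, y) :: st2.1, st2.2 + cs)) (acc, x)).1).reverse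
      = acc.reverse ++ (List.range l.length).map (fun (i : Nat) => (x + (i : Int) * cs, y)) := by
  induction l generalizing acc x with
  | nil => simp
  | cons a l ih =>
      simp only [List.foldl_cons, ih, List.length_cons, List.reverse_cons, List.append_assoc,
        List.singleton_append]
      congr 1
      refine map_range_succ _ _ _ _ (by simp) (fun i => ?_)
      simp only [Prod.mk.injEq]
      exact ⟨by push_cast; ring, by trivial⟩

-- A's outer fold in closed form (the x-component of the state is pos.1 at each step).
theorem grid_fold {α β : Type} (cl : List β) (l : List α) (g : List (List (Int × Int)))
    (x0 y cs : Int) :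
    ((l.foldl
        (fun (st : List (List (Int × Int)) × Int × Int) _ =>
          let inner :=
            cl.foldl
              (fun (st2 : List (Int × Int) × Int) _ =>
                ((st2.2, st.2.2) :: st2.1, st2.2 + cs))
              ([], st.2.1)
          (inner.1.reverse :: st.1, x0, st.2.2 + cs))
        (g, x0, y)).1).reverse
      = g.reverse ++ (List.range l.length).map
          (fun (r : Nat) => (List.range cl.length).map
            (fun (c : Nat) => (x0 + (c : Int) * cs, y + (r : Int) * cs))) := by
  induction l generalizing g y with
  | nil => simp
  | cons a l ih =>
      simp only [List.foldl_cons]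
      rw [ih]
      simp only [row_fold, List.length_cons, List.reverse_cons, List.reverse_nil,
        List.nil_append, List.append_assoc, List.singleton_append]
      congr 1
      refine map_range_succ _ _ _ _ ?_ (fun r => ?_)
      · congr 1
        funext c
        simp
      · congr 1
        funext c
        simp only [Prod.mk.injEq]
        exact ⟨by trivial, by push_cast; ring⟩

-- The y-translation map iterated r times shifts a closed-form row by r * cs.
theorem iterate_shift (cs : Int) (row : List (Int × Int)) (r : Nat) :
    (fun (row : List (Int × Int)) => row.map (fun p => (p.1, p.2 + cs)))^[r] row
      = row.map (fun p => (p.1, p.2 + (r : Int) * cs)) := by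
  induction r generalizing row with
  | zero => simp [List.map_id'']
  | succ r ih =>
      rw [Function.iterate_succ_apply, ih, List.map_map]
      congr 1
      funext p
      simp only [Function.comp_apply, Prod.mk.injEq]
      exact ⟨by trivial, by push_cast; ring⟩

-- B's outer fold in closed form: the accumulated (reversed) list of rows is the iterates of f.
theorem translate_fold {α : Type} (f : List (Int × Int) → List (Int × Int)) (l : List α)
    (h : List (Int × Int)) (t : List (List (Int × Int))) :
    (l.foldl (fun (g : List (List (Int × Int))) _ => f (g.headD []) :: g) (h :: t)).reverse
      = t.reverse ++ (List.range (l.length + 1)).map (fun (i : Nat) => f^[i] h) := by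
  induction l generalizing h t with
  | nil => simp
  | cons a l ih =>
      simp only [List.foldl_cons, List.headD_cons]
      rw [ih, List.length_cons, List.reverse_cons, List.append_assoc, List.singleton_append]
      congr 1
      exact map_range_succ _ _ _ _ (by simp) (fun i => by
        simp [Function.iterate_succ_apply])

-- ===== VERDICT (by name: the statement is the Claim_ definition above) =====
theorem createGameGrid_spec : Claim_equal_createGameGrid := by
  intro rows cols cell_size pos _
  show createGameGrid rows cols cell_size pos = createGameGrid_alt rows cols cell_size pos
  unfold createGameGrid createGameGrid_alt
  simp only [grid_fold, List.reverse_nil, List.nil_append]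
  split
  · rename_i h
    have : (PySem.List.pyRange 0 rows 1).length = 0 := by
      simp [PySem.List.length_pyRange_one]
      omega
    simp [this]
  · rename_i h
    rw [PySem.List.pyRange_one 0 cols, List.map_map, translate_fold]
    simp only [List.reverse_nil, List.nil_append, PySem.List.length_pyRange_one,
      iterate_shift, List.map_map, List.length_map, List.length_range]
    have hrows : (rows - 0).toNat = (rows - 1 - 0).toNat + 1 := by omega
    rw [hrows]
    apply List.map_congr_left
    intro r _
    apply List.map_congr_left
    intro c _
    simp only [Function.comp_apply, Prod.mk.injEq]
    exact ⟨by push_cast; ring, by trivial⟩
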